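-- pv_equiv track=rewrite | github.com/yakhyazadea/AOIS_4sem | aois_3_yakhyazade.py | func_create_matrix
-- ===== SOURCE A (Python) =====
-- def func_check_if_constituenta_contains_implicanta(constituenta, implicanta):
--     if implicanta[0] in constituenta and implicanta[1] in constituenta:
--         return True
--     else:
--         return False
--
-- def func_create_matrix(constituenti, implicanti):
--     i = 0
--     res_array = []
--     while i < len(implicanti):
--         j = 0
--         line_array = ["" for x in constituenti]
--         while j < len(constituenti):
--             if func_check_if_constituenta_contains_implicanta(constituenti[j], implicanti[i]):
--                 line_array[j] = "X"
--             j = j + 1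
--
--         res_array.append(line_array)
--         i = i + 1
--
--     return res_array
-- ===== SOURCE B (Python) =====
-- def func_create_matrix(constituenti, implicanti):
--     # Inverted index: value -> set of constituent column indices containing it.
--     index = {}
--     for j, constituenta in enumerate(constituenti):
--         for value in constituenta:
--             index.setdefault(value, set()).add(j)
--     n = len(constituenti)
--     res_array = []
--     for implicanta in implicanti:
--         cols = index.get(implicanta[0], set()) & index.get(implicanta[1], set())
--         res_array.append(["X" if j in cols else "" for j in range(n)])
--     return res_array
-- ===== Notes on version B (the rewrite author's own statement) =====
-- stated objective: faster
-- what changed: B replaces A's nested column scan (membership test of both implicant values in every constituent, per row) by a one-pass inverted index value->set of constituent indices, intersecting the two index entries per implicant and marking only those columns.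
-- outside the precondition, e.g. on func_create_matrix([], [[1]]): A returns [[]], B raises IndexError
import Mathlib
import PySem

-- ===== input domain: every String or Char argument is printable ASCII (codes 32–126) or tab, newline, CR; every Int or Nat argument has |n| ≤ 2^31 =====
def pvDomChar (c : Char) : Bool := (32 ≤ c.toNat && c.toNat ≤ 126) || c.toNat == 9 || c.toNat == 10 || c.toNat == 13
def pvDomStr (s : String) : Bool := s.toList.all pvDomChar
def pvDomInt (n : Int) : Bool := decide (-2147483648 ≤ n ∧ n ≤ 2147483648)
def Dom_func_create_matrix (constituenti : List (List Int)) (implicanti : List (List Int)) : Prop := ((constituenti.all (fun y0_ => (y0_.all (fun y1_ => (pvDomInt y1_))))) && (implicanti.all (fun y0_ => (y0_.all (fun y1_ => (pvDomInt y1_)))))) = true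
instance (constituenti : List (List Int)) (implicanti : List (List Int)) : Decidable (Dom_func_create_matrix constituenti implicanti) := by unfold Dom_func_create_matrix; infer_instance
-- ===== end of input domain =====

-- B replaces A's per-row membership scan by an inverted index (value -> set of column
-- indices) built in one pass, intersecting two index entries per implicant (alternative decomposition).

-- ===== PORT A =====
def func_check_if_constituenta_contains_implicanta (constituenta : List Int) (implicanta : List Int) : Bool :=
  if (decide (PySem.List.pyGetD implicanta 0 0 ∈ constituenta) && decide (PySem.List.pyGetD implicanta 1 0 ∈ constituenta)) then true else false

-- inner 'while j < len(constituenti)' loop of A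
def pvInnerA (constituenti : List (List Int)) (imp : List Int) (j : Nat) (line : List String) : List String :=
  if j < constituenti.length then
    pvInnerA constituenti imp (j + 1)
      (if func_check_if_constituenta_contains_implicanta (PySem.List.pyGetD constituenti (j : Int) []) imp
       then PySem.List.pySetD line (j : Int) "X" else line)
  else line
termination_by constituenti.length - j

-- outer 'while i < len(implicanti)' loop of A
def pvOuterA (constituenti : List (List Int)) (implicanti : List (List Int)) (i : Nat) (res : List (List String)) : List (List String) :=
  if i < implicanti.length then
    pvOuterA constituenti implicanti (i + 1)
      (res ++ [pvInnerA constituenti (PySem.List.pyGetD implicanti (i : Int) []) 0 (constituenti.map (fun _ => ""))])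
  else res
termination_by implicanti.length - i

def func_create_matrix (constituenti : List (List Int)) (implicanti : List (List Int)) : List (List String) :=
  pvOuterA constituenti implicanti 0 []

-- ===== PORT B =====
-- index.setdefault(value, set()).add(j)  ==  index[value] = index.get(value, set()) ∪ {j}  ==  Dict.modify
def pvIndexB (constituenti : List (List Int)) : PySem.Dict Int (PySem.Set Int) :=
  (PySem.List.enumerate constituenti 0).foldl
    (fun d p => p.2.foldl (fun d v => d.modify v PySem.Set.empty (fun s => s.add p.1)) d)
    PySem.Dict.empty

def func_create_matrix_alt (constituenti : List (List Int)) (implicanti : List (List Int)) : List (List String) :=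
  let index := pvIndexB constituenti
  let n := constituenti.length
  implicanti.foldl
    (fun res imp =>
      let cols := PySem.Set.inter (index.getD (PySem.List.pyGetD imp 0 0) PySem.Set.empty)
                                  (index.getD (PySem.List.pyGetD imp 1 0) PySem.Set.empty)
      res ++ [(PySem.List.pyRange 0 (n : Int) 1).map (fun j => if PySem.Set.contains cols j then "X" else "")])
    []

-- ===== PRECONDITION & SPEC =====
-- Pre_ excludes implicants shorter than two elements: there A raises IndexError whenever
-- constituenti is nonempty, and in the remaining corner (constituenti = []) A returns only by
-- accident of never reaching the index access, while B's up-front index lookup raises.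
def Pre_func_create_matrix (constituenti : List (List Int)) (implicanti : List (List Int)) : Prop :=
  ∀ imp ∈ implicanti, 2 ≤ imp.length
instance (constituenti : List (List Int)) (implicanti : List (List Int)) : Decidable (Pre_func_create_matrix constituenti implicanti) := by unfold Pre_func_create_matrix; infer_instance

def pvWitness_func_create_matrix : List (List Int) × List (List Int) := ([[0, 1], [1, 2]], [[1, 2], [0, 2]])

def Spec_func_create_matrix (constituenti : List (List Int)) (implicanti : List (List Int)) (out : List (List String)) : Prop := out = func_create_matrix_alt constituenti implicanti
instance (constituenti : List (List Int)) (implicanti : List (List Int)) (out : List (List String)) : Decidable (Spec_func_create_matrix constituenti implicanti out) := by unfold Spec_func_create_matrix; infer_instance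

-- ===== CLAIM (what is proved, stated in full; the proofs are below) =====
def Claim_equal_func_create_matrix : Prop := ∀ (constituenti : List (List Int)) (implicanti : List (List Int)), Dom_func_create_matrix constituenti implicanti → Pre_func_create_matrix constituenti implicanti → Spec_func_create_matrix constituenti implicanti (func_create_matrix constituenti implicanti)

-- ===== LEMMAS AND PROOFS =====

-- the common reference row for an implicant with values a, b
def pvRow (constituenti : List (List Int)) (a b : Int) : List String :=
  constituenti.map (fun con => if a ∈ con ∧ b ∈ con then "X" else "")

-- A's inner loop fills the blank suffix with the reference marks
lemma pvInnerA_eq (c : List (List Int)) (imp : List Int) :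
    ∀ n j (pre : List String), c.length - j = n → pre.length = j →
      pvInnerA c imp j (pre ++ List.replicate (c.length - j) "") =
        pre ++ (c.drop j).map (fun con =>
          if func_check_if_constituenta_contains_implicanta con imp then "X" else "") := by
  intro n
  induction n with
  | zero =>
    intro j pre hn hp
    have hd : c.drop j = [] := List.drop_eq_nil_of_le (by omega)
    rw [pvInnerA]
    simp [show ¬ (j < c.length) by omega, hd, hn]
  | succ m ih =>
    intro j pre hn hp
    have hj : j < c.length := by omega
    have hrep : List.replicate (c.length - j) "" = "" :: List.replicate (c.length - (j+1)) "" := by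
      rw [show c.length - j = (c.length - (j+1)) + 1 by omega, List.replicate_succ]
    have hget : PySem.List.pyGetD c (j : Int) [] = c.get ⟨j, hj⟩ :=
      PySem.List.pyGetD_ofNat c j [] hj
    have hsetlen : j < (pre ++ "" :: List.replicate (c.length - (j+1)) "").length := by
      simp; omega
    set elt := if func_check_if_constituenta_contains_implicanta (c.get ⟨j, hj⟩) imp then "X" else "" with helt
    rw [pvInnerA]
    simp only [hj, if_pos, hget, hrep]
    have hstep : (if func_check_if_constituenta_contains_implicanta (c.get ⟨j, hj⟩) imp
          then PySem.List.pySetD (pre ++ "" :: List.replicate (c.length - (j+1)) "") (j : Int) "X"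
          else (pre ++ "" :: List.replicate (c.length - (j+1)) "")) =
        (pre ++ [elt]) ++ List.replicate (c.length - (j+1)) "" := by
      by_cases hc : func_check_if_constituenta_contains_implicanta (c.get ⟨j, hj⟩) imp
      · rw [if_pos hc, helt, if_pos hc]
        rw [PySem.List.pySetD, PySem.List.pySet?_natCast _ _ _ hsetlen, Option.getD_some]
        rw [← hp, List.set_append_right _ _ (le_refl _)]
        simp
      · rw [if_neg hc, helt, if_neg hc]
        simp
    rw [hstep, ih (j + 1) (pre ++ [elt]) (by omega) (by simp [hp])]
    rw [List.drop_eq_getElem_cons hj, List.map_cons]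
    simp [helt]

lemma pvInnerA_row (c : List (List Int)) (imp : List Int) :
    pvInnerA c imp 0 (c.map (fun _ => "")) =
      pvRow c (PySem.List.pyGetD imp 0 0) (PySem.List.pyGetD imp 1 0) := by
  have h0 := pvInnerA_eq c imp c.length 0 [] (by omega) rfl
  simp only [List.nil_append, Nat.sub_zero, List.drop_zero] at h0
  rw [show c.map (fun _ => "") = List.replicate c.length "" from by simp]
  rw [h0, pvRow]
  apply List.map_congr_left
  intro con _
  simp [func_check_if_constituenta_contains_implicanta]

lemma pvOuterA_eq (c : List (List Int)) (imps : List (List Int)) :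
    ∀ n i (res : List (List String)), imps.length - i = n →
      pvOuterA c imps i res = res ++ (imps.drop i).map (fun imp =>
        pvRow c (PySem.List.pyGetD imp 0 0) (PySem.List.pyGetD imp 1 0)) := by
  intro n
  induction n with
  | zero =>
    intro i res hn
    have hd : imps.drop i = [] := List.drop_eq_nil_of_le (by omega)
    rw [pvOuterA]
    simp [show ¬ (i < imps.length) by omega, hd]
  | succ m ih =>
    intro i res hn
    have hi : i < imps.length := by omega
    rw [pvOuterA]
    simp only [hi, if_pos]
    rw [PySem.List.pyGetD_ofNat imps i [] hi, pvInnerA_row,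
        ih (i + 1) _ (by omega), List.drop_eq_getElem_cons hi, List.map_cons]
    simp

-- B's inner setdefault/add loop over one constituent, as a membership fact
lemma pvAddLoop_mem (cvals : List Int) (i : Int) (d : PySem.Dict Int (PySem.Set Int)) (v j : Int) :
    j ∈ (cvals.foldl (fun d w => d.modify w PySem.Set.empty (fun s => s.add i)) d).getD v PySem.Set.empty ↔
      (v ∈ cvals ∧ j = i) ∨ j ∈ d.getD v PySem.Set.empty := by
  induction cvals generalizing d with
  | nil => simp
  | cons w cs ih =>
    simp only [List.foldl_cons, ih, List.mem_cons]
    rw [PySem.Dict.getD_modify]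
    by_cases hvw : v = w
    · subst hvw
      simp [PySem.Set.mem_add]
      tauto
    · simp [hvw]

-- B's outer enumerate loop, as a membership fact
lemma pvEnumLoop_mem (l : List (Int × List Int)) (d : PySem.Dict Int (PySem.Set Int)) (v j : Int) :
    j ∈ (l.foldl (fun d p => p.2.foldl (fun d w => d.modify w PySem.Set.empty (fun s => s.add p.1)) d) d).getD v PySem.Set.empty ↔
      (∃ p ∈ l, v ∈ p.2 ∧ j = p.1) ∨ j ∈ d.getD v PySem.Set.empty := by
  induction l generalizing d with
  | nil => simp
  | cons p ps ih =>
    simp only [List.foldl_cons, ih, pvAddLoop_mem, List.mem_cons]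
    constructor
    · rintro (⟨q, hq, h1, h2⟩ | ⟨h1, h2⟩ | h)
      · exact Or.inl ⟨q, Or.inr hq, h1, h2⟩
      · exact Or.inl ⟨p, Or.inl rfl, h1, h2⟩
      · exact Or.inr h
    · rintro (⟨q, (rfl | hq), h1, h2⟩ | h)
      · exact Or.inr (Or.inl ⟨h1, h2⟩)
      · exact Or.inl ⟨q, hq, h1, h2⟩
      · exact Or.inr (Or.inr h)

-- the inverted index is correct: j is recorded under v iff column j's constituent contains v
lemma pvIndexB_mem (c : List (List Int)) (v j : Int) :
    j ∈ (pvIndexB c).getD v PySem.Set.empty ↔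
      ∃ (k : Nat) (hk : k < c.length), j = (k : Int) ∧ v ∈ c.get ⟨k, hk⟩ := by
  rw [pvIndexB, pvEnumLoop_mem]
  simp only [PySem.Dict.getD_empty]
  constructor
  · rintro (⟨p, hp, hv, hj⟩ | h)
    · rw [PySem.List.mem_enumerate_iff] at hp
      obtain ⟨k, hk, rfl⟩ := hp
      exact ⟨k, hk, by simpa using hj, by simpa using hv⟩
    · simp [PySem.Set.empty] at h
  · rintro ⟨k, hk, rfl, hv⟩
    left
    exact ⟨((k : Int), c.get ⟨k, hk⟩), by rw [PySem.List.mem_enumerate_iff]; exact ⟨k, hk, by simp⟩, hv, rfl⟩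

-- B's comprehension row equals the reference row
lemma pvRowB (c : List (List Int)) (a b : Int) :
    (PySem.List.pyRange 0 (c.length : Int) 1).map
      (fun j => if PySem.Set.contains (PySem.Set.inter ((pvIndexB c).getD a PySem.Set.empty)
        ((pvIndexB c).getD b PySem.Set.empty)) j then "X" else "") = pvRow c a b := by
  rw [PySem.List.pyRange_zero_natCast c.length, List.map_map, pvRow]
  apply List.ext_getElem
  · simp
  · intro k h1 h2
    simp only [List.getElem_map, List.getElem_range, Function.comp_apply]
    have hk : k < c.length := by simpa using h1
    have hmem : ∀ v : Int, ((k : Int) ∈ (pvIndexB c).getD v PySem.Set.empty ↔ v ∈ c.get ⟨k, hk⟩) := by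
      intro v
      rw [pvIndexB_mem]
      constructor
      · rintro ⟨k', hk', hkk, hv⟩
        have : k = k' := by exact_mod_cast hkk
        subst this; exact hv
      · intro hv; exact ⟨k, hk, rfl, hv⟩
    rw [PySem.Set.contains_eq_decide]
    simp only [PySem.Set.mem_inter, hmem, List.get_eq_getElem]
    split_ifs with h1 h2 <;> simp_all

lemma pvA_eq (c : List (List Int)) (imps : List (List Int)) :
    func_create_matrix c imps =
      imps.map (fun imp => pvRow c (PySem.List.pyGetD imp 0 0) (PySem.List.pyGetD imp 1 0)) := by
  rw [func_create_matrix, pvOuterA_eq c imps imps.length 0 [] (by omega)]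
  simp

lemma pvB_eq (c : List (List Int)) (imps : List (List Int)) :
    func_create_matrix_alt c imps =
      imps.map (fun imp => pvRow c (PySem.List.pyGetD imp 0 0) (PySem.List.pyGetD imp 1 0)) := by
  rw [func_create_matrix_alt]
  rw [PySem.List.foldl_append_singleton_eq_map]
  apply List.map_congr_left
  intro imp _
  exact pvRowB c (PySem.List.pyGetD imp 0 0) (PySem.List.pyGetD imp 1 0)

-- ===== VERDICT (by name: the statement is the Claim_ definition above) =====
theorem func_create_matrix_spec : Claim_equal_func_create_matrix := by
  intro c imps _ _
  unfold Spec_func_create_matrix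
  rw [pvA_eq, pvB_eq]
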